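-- pv_equiv track=rewrite | github.com/Mahendran6381/competitive-programming | codeforces/I_Love_%Username%/I_Love_Username.py | amazing_performence
-- ===== SOURCE A (Python) =====
-- def amazing_performence(arr):
--     high = low = arr[0]
--     ans = 0
--     for i in arr:
--         if i >high:
--             high = i
--             ans +=1
--         elif i<low:
--             low = i
--             ans+=1
--     return ans
-- ===== SOURCE B (Python) =====
-- def amazing_performence(arr):
--     highs = [arr[0]]
--     lows = [arr[0]]
--     for x in arr[1:]:
--         highs.append(max(x, highs[-1]))
--         lows.append(min(x, lows[-1]))
--     return sum(1 for x, h, l in zip(arr[1:], highs, lows) if x > h or x < l)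
-- ===== Notes on version B (the rewrite author's own statement) =====
-- stated objective: alternative
-- what changed: B precomputes prefix running-max and running-min tables and then counts record-breakers by zipping each element with the extremes of its strict prefix, instead of A's single fold carrying high/low/ans with an if/elif update.
import Mathlib
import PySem

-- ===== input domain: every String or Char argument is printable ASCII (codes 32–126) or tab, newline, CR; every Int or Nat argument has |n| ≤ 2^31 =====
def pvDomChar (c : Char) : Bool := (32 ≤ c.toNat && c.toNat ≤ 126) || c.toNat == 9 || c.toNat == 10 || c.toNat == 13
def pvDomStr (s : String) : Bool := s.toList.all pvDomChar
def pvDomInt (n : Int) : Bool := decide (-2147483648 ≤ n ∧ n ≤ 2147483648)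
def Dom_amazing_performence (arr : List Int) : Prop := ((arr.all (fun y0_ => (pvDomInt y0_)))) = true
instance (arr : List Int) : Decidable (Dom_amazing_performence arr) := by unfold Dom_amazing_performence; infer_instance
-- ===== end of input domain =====

-- B replaces A's single high/low/ans fold by two prefix-extreme tables and a zip count; equal return value on nonempty lists.

-- ===== PORT A =====
def amazing_performence (arr : List Int) : Int :=
  match PySem.List.pyGet? arr 0 with
  | none => 0   -- unreachable under Pre_ (Python raises IndexError on [])
  | some a0 =>
    let s := arr.foldl (fun (s : Int × Int × Int) i =>
      if i > s.1 then (i, s.2.1, s.2.2 + 1)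
      else if i < s.2.1 then (s.1, i, s.2.2 + 1)
      else s) (a0, a0, 0)
    s.2.2

-- ===== PORT B =====
def amazing_performence_alt (arr : List Int) : Int :=
  match PySem.List.pyGet? arr 0 with
  | none => 0   -- unreachable under Pre_ (Python raises IndexError on [])
  | some a0 =>
    let rest := PySem.List.slice arr (some 1) none
    let highs := rest.foldl (fun hs x => hs ++ [max x hs.getLast!]) [a0]
    let lows := rest.foldl (fun ls x => ls ++ [min x ls.getLast!]) [a0]
    (rest.zip (highs.zip lows)).foldl
      (fun s t => if t.1 > t.2.1 || t.1 < t.2.2 then s + 1 else s) 0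

-- ===== PRECONDITION & SPEC =====
-- Pre_ excludes only the empty list, on which A raises IndexError.
def Pre_amazing_performence (arr : List Int) : Prop := arr ≠ []
instance (arr : List Int) : Decidable (Pre_amazing_performence arr) := by
  unfold Pre_amazing_performence; infer_instance
def pvWitness_amazing_performence : List Int := [3, 1, 4]

def Spec_amazing_performence (arr : List Int) (out : Int) : Prop := out = amazing_performence_alt arr
instance (arr : List Int) (out : Int) : Decidable (Spec_amazing_performence arr out) := by unfold Spec_amazing_performence; infer_instance

-- ===== CLAIM (what is proved, stated in full; the proofs are below) =====
def Claim_equal_amazing_performence : Prop := ∀ (arr : List Int), Dom_amazing_performence arr → Pre_amazing_performence arr → Spec_amazing_performence arr (amazing_performence arr)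

-- ===== LEMMAS AND PROOFS =====

theorem pvGetLastBang (l : List Int) (h : Int) : (l ++ [h]).getLast! = h :=
  List.getLast!_of_getLast? (by simp)

-- common recursive characterisation: records of the strict prefix extremes
def pvCount : Int → Int → List Int → Int
  | _, _, [] => 0
  | hi, lo, x :: xs => (if x > hi ∨ x < lo then 1 else 0) + pvCount (max x hi) (min x lo) xs

-- prefix-extreme table, as B builds it (f = max or min)
def pvPref (f : Int → Int → Int) (h : Int) : List Int → List Int
  | [] => [h]
  | x :: xs => h :: pvPref f (f x h) xs

theorem pvBuild (f : Int → Int → Int) (xs l : List Int) (h : Int) :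
    xs.foldl (fun hs x => hs ++ [f x hs.getLast!]) (l ++ [h]) = l ++ pvPref f h xs := by
  induction xs generalizing l h with
  | nil => simp [pvPref]
  | cons x xs ih =>
    simp only [List.foldl_cons, pvPref]
    rw [pvGetLastBang, ih (l ++ [h]) (f x h)]
    simp

theorem pvA (xs : List Int) (hi lo ans : Int) (hle : lo ≤ hi) :
    (xs.foldl (fun (s : Int × Int × Int) i =>
      if i > s.1 then (i, s.2.1, s.2.2 + 1)
      else if i < s.2.1 then (s.1, i, s.2.2 + 1)
      else s) (hi, lo, ans)).2.2 = ans + pvCount hi lo xs := by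
  induction xs generalizing hi lo ans with
  | nil => simp [pvCount]
  | cons x xs ih =>
    simp only [List.foldl_cons, pvCount]
    by_cases h1 : x > hi
    · rw [if_pos h1]
      rw [ih x lo (ans + 1) (by omega)]
      have hmax : max x hi = x := by omega
      have hmin : min x lo = lo := by omega
      rw [hmax, hmin, if_pos (Or.inl h1)]; omega
    · rw [if_neg h1]
      by_cases h2 : x < lo
      · rw [if_pos h2, ih hi x (ans + 1) (by omega)]
        have hmax : max x hi = hi := by omega
        have hmin : min x lo = x := by omega
        rw [hmax, hmin, if_pos (Or.inr h2)]; omega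
      · rw [if_neg h2, ih hi lo ans hle]
        have hmax : max x hi = hi := by omega
        have hmin : min x lo = lo := by omega
        rw [hmax, hmin, if_neg (by omega)]; omega

theorem pvB (xs : List Int) (hi lo s : Int) :
    ((xs.zip ((pvPref max hi xs).zip (pvPref min lo xs))).foldl
      (fun s t => if t.1 > t.2.1 || t.1 < t.2.2 then s + 1 else s) s)
    = s + pvCount hi lo xs := by
  induction xs generalizing hi lo s with
  | nil => simp [pvCount]
  | cons x xs ih =>
    simp only [pvPref, List.zip_cons_cons, List.foldl_cons, pvCount]
    rw [ih]
    by_cases h : x > hi ∨ x < lo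
    · rw [if_pos (by simpa using h), if_pos h]; omega
    · rw [if_neg (by simpa using h), if_neg h]; omega

-- ===== VERDICT (by name: the statement is the Claim_ definition above) =====
theorem amazing_performence_spec : Claim_equal_amazing_performence := by
  intro arr _ hpre
  obtain ⟨a0, rest, rfl⟩ : ∃ a0 rest, arr = a0 :: rest := by
    cases arr with
    | nil => exact absurd rfl hpre
    | cons a r => exact ⟨a, r, rfl⟩
  unfold Spec_amazing_performence amazing_performence amazing_performence_alt
  rw [PySem.List.pyGet?_zero_cons]
  simp only [PySem.List.slice_from_one, List.tail_cons]
  have hA : ((a0 :: rest).foldl (fun (s : Int × Int × Int) i =>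
      if i > s.1 then (i, s.2.1, s.2.2 + 1)
      else if i < s.2.1 then (s.1, i, s.2.2 + 1)
      else s) (a0, a0, 0)).2.2 = pvCount a0 a0 rest := by
    simp only [List.foldl_cons, lt_irrefl, if_false, pvA rest a0 a0 0 le_rfl]
    ring
  have hH := pvBuild max rest [] a0
  have hL := pvBuild min rest [] a0
  simp only [List.nil_append] at hH hL
  rw [hA, hH, hL, pvB rest a0 a0 0]; ring
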